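-- pv_equiv track=rewrite | github.com/raphaelakreiser-sony/head_pose_icub_loihi | loihi_net/connections.py | connect_populations_1to1
-- ===== SOURCE A (Python) =====
-- def connect_populations_1to1(p1, p2, shift_offset=0):
--     """
--     :param p1: size of pre-synaptic neuron group
--     :param p2: size of post-synaptic neuron group
--     :param shift_offset: if asymmetric connectivity, positive values shift right, negative left
--     :return: lists of pre- and post-synaptic indices
--     """
--
--     list_exc_pre = []
--     list_exc_post = []
--
--     # Sweep over all neurons of both populations (p2 receive list_exc_pre, list_exc_post)
--     for srcNeuron in range(p1):
--         for destNeuron in range(p2):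
--
--             # Check if shift or not
--             if (shift_offset == 0):
--                 if (srcNeuron == destNeuron):
--                     list_exc_pre.append(srcNeuron)
--                     list_exc_post.append(destNeuron)
--             elif (shift_offset > 0):
--                 if ((destNeuron + shift_offset <= p2)
--                         & (destNeuron == srcNeuron + shift_offset)):
--                     list_exc_pre.append(srcNeuron)
--                     list_exc_post.append(destNeuron)
--                 elif ((srcNeuron + shift_offset >= p2)
--                       & (destNeuron == -1 + shift_offset)):
--                     list_exc_pre.append(srcNeuron)
--                     list_exc_post.append(-1 + 2 * shift_offset + srcNeuron - p2)
--             elif (shift_offset < 0):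
--                 if ((srcNeuron + shift_offset >= 0)
--                         & (srcNeuron == destNeuron - shift_offset)):
--                     list_exc_pre.append(srcNeuron)
--                     list_exc_post.append(destNeuron)
--                 if ((srcNeuron + shift_offset < 0)
--                         & (destNeuron == p2 + shift_offset + srcNeuron)):
--                     list_exc_pre.append(srcNeuron)
--                     list_exc_post.append(destNeuron)
--             destNeuron = destNeuron + 1
--         srcNeuron = srcNeuron + 1
--     return list_exc_pre, list_exc_post
-- ===== SOURCE B (Python) =====
-- def _dest_of(p2, sh, s):
--     # unique post index for source s, or None (O(1) arithmetic, no scan over p2)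
--     if sh == 0:
--         return s if s < p2 else None
--     if sh > 0:
--         if s + 2 * sh <= p2:
--             return s + sh
--         if s + sh >= p2 and sh - 1 < p2:
--             return 2 * sh - 1 + s - p2
--         return None
--     if s + sh >= 0:
--         return s + sh if s + sh < p2 else None
--     d = p2 + sh + s
--     return d if d >= 0 else None
--
-- def connect_populations_1to1(p1, p2, shift_offset=0):
--     pre = []
--     post = []
--     for s in range(p1):
--         d = _dest_of(p2, shift_offset, s)
--         if d is not None:
--             pre.append(s)
--             post.append(d)
--     return pre, post
-- ===== Notes on version B (the rewrite author's own statement) =====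
-- stated objective: faster
-- what changed: Replaces the nested p1*p2 scan with a single pass over sources, computing each source's unique post index by closed-form arithmetic.
import Mathlib
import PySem

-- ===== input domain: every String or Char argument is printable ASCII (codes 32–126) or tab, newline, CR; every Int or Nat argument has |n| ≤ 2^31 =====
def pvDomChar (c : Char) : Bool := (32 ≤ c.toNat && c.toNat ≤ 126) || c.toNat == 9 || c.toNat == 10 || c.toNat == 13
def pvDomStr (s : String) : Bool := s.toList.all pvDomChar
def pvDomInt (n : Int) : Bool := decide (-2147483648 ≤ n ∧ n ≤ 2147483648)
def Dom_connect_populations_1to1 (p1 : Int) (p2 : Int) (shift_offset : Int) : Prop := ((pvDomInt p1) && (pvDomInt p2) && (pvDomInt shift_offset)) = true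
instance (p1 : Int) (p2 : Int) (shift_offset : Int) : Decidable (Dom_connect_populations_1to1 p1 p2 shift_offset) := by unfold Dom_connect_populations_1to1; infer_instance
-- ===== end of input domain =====

-- B replaces A's nested p1*p2 scan by a single pass computing each source's unique post index arithmetically (objective: faster).

-- ===== PORT A =====
def connect_populations_1to1 (p1 : Int) (p2 : Int) (shift_offset : Int) : List Int × List Int :=
  (PySem.List.pyRange 0 p1 1).foldl (fun st srcNeuron =>
    (PySem.List.pyRange 0 p2 1).foldl (fun st destNeuron =>
      if shift_offset = 0 then
        if srcNeuron = destNeuron then (st.1 ++ [srcNeuron], st.2 ++ [destNeuron]) else st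
      else if shift_offset > 0 then
        if destNeuron + shift_offset ≤ p2 ∧ destNeuron = srcNeuron + shift_offset then
          (st.1 ++ [srcNeuron], st.2 ++ [destNeuron])
        else if srcNeuron + shift_offset ≥ p2 ∧ destNeuron = -1 + shift_offset then
          (st.1 ++ [srcNeuron], st.2 ++ [-1 + 2 * shift_offset + srcNeuron - p2])
        else st
      else if shift_offset < 0 then
        let st1 := if srcNeuron + shift_offset ≥ 0 ∧ srcNeuron = destNeuron - shift_offset then
            (st.1 ++ [srcNeuron], st.2 ++ [destNeuron]) else st
        if srcNeuron + shift_offset < 0 ∧ destNeuron = p2 + shift_offset + srcNeuron then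
          (st1.1 ++ [srcNeuron], st1.2 ++ [destNeuron]) else st1
      else st) st) ([], [])

-- ===== PORT B =====
def destOf (p2 : Int) (sh : Int) (s : Int) : Option Int :=
  if sh = 0 then
    if s < p2 then some s else none
  else if sh > 0 then
    if s + 2 * sh ≤ p2 then some (s + sh)
    else if s + sh ≥ p2 ∧ sh - 1 < p2 then some (2 * sh - 1 + s - p2)
    else none
  else if s + sh ≥ 0 then
    if s + sh < p2 then some (s + sh) else none
  else if p2 + sh + s ≥ 0 then some (p2 + sh + s) else none

def connect_populations_1to1_alt (p1 : Int) (p2 : Int) (shift_offset : Int) : List Int × List Int :=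
  (PySem.List.pyRange 0 p1 1).foldl (fun st s =>
    match destOf p2 shift_offset s with
    | some d => (st.1 ++ [s], st.2 ++ [d])
    | none => st) ([], [])

-- ===== PRECONDITION & SPEC =====
def Spec_connect_populations_1to1 (p1 : Int) (p2 : Int) (shift_offset : Int) (out : List Int × List Int) : Prop := out = connect_populations_1to1_alt p1 p2 shift_offset
instance (p1 : Int) (p2 : Int) (shift_offset : Int) (out : List Int × List Int) : Decidable (Spec_connect_populations_1to1 p1 p2 shift_offset out) := by unfold Spec_connect_populations_1to1; infer_instance

-- ===== CLAIM (what is proved, stated in full; the proofs are below) =====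
def Claim_equal_connect_populations_1to1 : Prop := ∀ (p1 : Int) (p2 : Int) (shift_offset : Int), Dom_connect_populations_1to1 p1 p2 shift_offset → Spec_connect_populations_1to1 p1 p2 shift_offset (connect_populations_1to1 p1 p2 shift_offset)

-- ===== LEMMAS AND PROOFS =====

-- a fold whose body appends g x / h x to the two components equals a pair of flatMaps
theorem pairFold {α : Type} (l : List α) (f : List Int × List Int → α → List Int × List Int)
    (g h : α → List Int)
    (hf : ∀ st x, x ∈ l → f st x = (st.1 ++ g x, st.2 ++ h x)) (st : List Int × List Int) :
    l.foldl f st = (st.1 ++ l.flatMap g, st.2 ++ l.flatMap h) := by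
  induction l generalizing st with
  | nil => simp
  | cons a t ih =>
    simp only [List.foldl_cons, List.flatMap_cons]
    rw [hf st a (by simp), ih (fun st x hx => hf st x (by simp [hx]))]
    simp

theorem flatMap_ite_single (a b t : Int) (v : List Int) :
    (PySem.List.pyRange a b 1).flatMap (fun d => if d = t then v else []) =
      if a ≤ t ∧ t < b then v else [] := by
  by_cases h : a ≤ t ∧ t < b
  · rw [PySem.List.pyRange_one_append a t b h.1 (by omega), PySem.List.pyRange_one_cons h.2]
    rw [if_pos h]
    have h1 : (PySem.List.pyRange a t 1).flatMap (fun d => if d = t then v else []) = [] := by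
      rw [List.flatMap_eq_nil_iff]
      intro d hd
      have := (PySem.List.mem_pyRange_one).1 hd
      simp [show d ≠ t by omega]
    have h2 : (PySem.List.pyRange (t+1) b 1).flatMap (fun d => if d = t then v else []) = [] := by
      rw [List.flatMap_eq_nil_iff]
      intro d hd
      have := (PySem.List.mem_pyRange_one).1 hd
      simp [show d ≠ t by omega]
    simp [h1, h2]
  · rw [if_neg h, List.flatMap_eq_nil_iff]
    intro d hd
    have := (PySem.List.mem_pyRange_one).1 hd
    simp only [ite_eq_right_iff]
    intro he; exfalso; omega

-- the inner sweep over destinations equals the single arithmetic step of B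
theorem inner_eq (p2 sh s : Int) (hs : 0 ≤ s) (st : List Int × List Int) :
    (PySem.List.pyRange 0 p2 1).foldl (fun st destNeuron =>
      if sh = 0 then
        if s = destNeuron then (st.1 ++ [s], st.2 ++ [destNeuron]) else st
      else if sh > 0 then
        if destNeuron + sh ≤ p2 ∧ destNeuron = s + sh then
          (st.1 ++ [s], st.2 ++ [destNeuron])
        else if s + sh ≥ p2 ∧ destNeuron = -1 + sh then
          (st.1 ++ [s], st.2 ++ [-1 + 2 * sh + s - p2])
        else st
      else if sh < 0 then
        let st1 := if s + sh ≥ 0 ∧ s = destNeuron - sh then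
            (st.1 ++ [s], st.2 ++ [destNeuron]) else st
        if s + sh < 0 ∧ destNeuron = p2 + sh + s then
          (st1.1 ++ [s], st1.2 ++ [destNeuron]) else st1
      else st) st =
    (match destOf p2 sh s with
     | some d => (st.1 ++ [s], st.2 ++ [d])
     | none => st) := by
  rcases lt_trichotomy sh 0 with hsh | hsh | hsh
  · -- sh < 0
    by_cases hpos : s + sh ≥ 0
    · rw [pairFold _ _ (fun d => if d = s + sh then [s] else [])
          (fun d => if d = s + sh then [s + sh] else [])
          (fun st d _ => by
            dsimp only
            split_ifs <;> first | rfl | (exfalso; omega) | (simp; first | rfl | omega) | simp)]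
      rw [flatMap_ite_single, flatMap_ite_single]
      unfold destOf
      split_ifs <;> first | rfl | (exfalso; omega) | (simp; first | rfl | omega) | simp
    · rw [pairFold _ _ (fun d => if d = p2 + sh + s then [s] else [])
          (fun d => if d = p2 + sh + s then [p2 + sh + s] else [])
          (fun st d _ => by
            dsimp only
            split_ifs <;> first | rfl | (exfalso; omega) | (simp; first | rfl | omega) | simp)]
      rw [flatMap_ite_single, flatMap_ite_single]
      unfold destOf
      split_ifs <;> first | rfl | (exfalso; omega) | (simp; first | rfl | omega) | simp
  · -- sh = 0
    subst hsh
    rw [pairFold _ _ (fun d => if d = s then [s] else []) (fun d => if d = s then [s] else [])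
        (fun st d _ => by
          dsimp only
          split_ifs <;> first | rfl | (exfalso; omega) | (simp; first | rfl | omega) | simp)]
    rw [flatMap_ite_single]
    unfold destOf
    split_ifs <;> first | rfl | (exfalso; omega) | (simp; first | rfl | omega) | simp
  · -- sh > 0
    by_cases hc1 : s + 2 * sh ≤ p2
    · rw [pairFold _ _ (fun d => if d = s + sh then [s] else [])
          (fun d => if d = s + sh then [s + sh] else [])
          (fun st d _ => by
            dsimp only
            split_ifs <;> first | rfl | (exfalso; omega) | (simp; first | rfl | omega) | simp)]
      rw [flatMap_ite_single, flatMap_ite_single]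
      unfold destOf
      split_ifs <;> first | rfl | (exfalso; omega) | (simp; first | rfl | omega) | simp
    · by_cases hc2 : s + sh ≥ p2
      · rw [pairFold _ _ (fun d => if d = -1 + sh then [s] else [])
            (fun d => if d = -1 + sh then [-1 + 2 * sh + s - p2] else [])
            (fun st d _ => by
              dsimp only
              split_ifs <;> first | rfl | (exfalso; omega) | (simp; first | rfl | omega) | simp)]
        rw [flatMap_ite_single, flatMap_ite_single]
        unfold destOf
        split_ifs <;> first | rfl | (exfalso; omega) | (simp; first | rfl | omega) | simp
      · rw [pairFold _ _ (fun _ => []) (fun _ => [])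
            (fun st d _ => by
              dsimp only
              split_ifs <;> first | rfl | (exfalso; omega) | (simp; first | rfl | omega) | simp)]
        rw [show (PySem.List.pyRange 0 p2 1).flatMap (fun _ => ([] : List Int)) = [] from
          List.flatMap_eq_nil_iff.2 (fun _ _ => rfl)]
        unfold destOf
        split_ifs <;> first | rfl | (exfalso; omega) | (simp; first | rfl | omega) | simp

-- ===== VERDICT (by name: the statement is the Claim_ definition above) =====
theorem connect_populations_1to1_spec : Claim_equal_connect_populations_1to1 := by
  intro p1 p2 sh _
  unfold Spec_connect_populations_1to1 connect_populations_1to1 connect_populations_1to1_alt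
  apply PySem.List.foldl_congr_mem
  intro st s hsmem
  exact inner_eq p2 sh s ((PySem.List.mem_pyRange_one).1 hsmem).1 st
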